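-- pv_equiv track=rewrite | github.com/hgn0617/Grover-kube-scheduler-simulator | generate_custom_test_suite.py | _normalize_edges
-- ===== SOURCE A (Python) =====
-- def _normalize_edges(edges: list[tuple[int, int]]) -> list[list[int]]:
--     seen: set[tuple[int, int]] = set()
--     out: list[list[int]] = []
--     for u, v in edges:
--         a, b = (u, v) if u <= v else (v, u)
--         if a == b:
--             continue
--         if (a, b) in seen:
--             continue
--         seen.add((a, b))
--         out.append([a, b])
--     out.sort()
--     return out
-- ===== SOURCE B (Python) =====
-- def _normalize_edges(edges: list[tuple[int, int]]) -> list[list[int]]: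
--     pairs: list[list[int]] = []
--     for u, v in edges:
--         if u == v:
--             continue
--         pairs.append([u, v] if u < v else [v, u])
--     pairs.sort()
--     out: list[list[int]] = []
--     for p in pairs:
--         if not out or out[-1] != p:
--             out.append(p)
--     return out
-- ===== Notes on version B (the rewrite author's own statement) =====
-- stated objective: alternative
-- what changed: Replaces the seen-set membership dedup with sort-then-adjacent-scan: canonical pairs are collected in one pass, sorted, and duplicates dropped by comparing each pair with the last kept one.
import Mathlib
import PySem

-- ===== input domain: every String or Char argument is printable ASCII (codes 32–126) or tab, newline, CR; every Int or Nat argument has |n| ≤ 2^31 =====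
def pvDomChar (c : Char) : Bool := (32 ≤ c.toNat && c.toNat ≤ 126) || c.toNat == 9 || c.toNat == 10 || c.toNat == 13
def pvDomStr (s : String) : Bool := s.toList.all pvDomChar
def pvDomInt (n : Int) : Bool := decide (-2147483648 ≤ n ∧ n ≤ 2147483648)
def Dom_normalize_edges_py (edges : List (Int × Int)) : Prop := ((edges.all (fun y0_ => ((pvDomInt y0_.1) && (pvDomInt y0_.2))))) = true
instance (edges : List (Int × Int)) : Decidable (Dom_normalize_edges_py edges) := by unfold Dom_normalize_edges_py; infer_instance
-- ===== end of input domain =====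

-- B replaces A's seen-set membership dedup by sort-then-adjacent-dedup (alternative decomposition, same cost).

-- ===== PORT A =====
-- loop body of A: canonicalize, skip self-loops, skip pairs already in `seen`, else record
def pvStepA (st : PySem.Set (Int × Int) × List (List Int)) (uv : Int × Int) :
    PySem.Set (Int × Int) × List (List Int) :=
  let ab := if uv.1 ≤ uv.2 then (uv.1, uv.2) else (uv.2, uv.1)
  if ab.1 = ab.2 then st
  else if PySem.Set.contains st.1 ab then st
  else (PySem.Set.add st.1 ab, st.2 ++ [[ab.1, ab.2]])

def normalize_edges_py (edges : List (Int × Int)) : List (List Int) :=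
  PySem.List.sorted (edges.foldl pvStepA (PySem.Set.empty, [])).2 (fun x => x) false

-- ===== PORT B =====
-- first pass of B: canonical [min,max] pairs, self-loops skipped
def pvStepP (acc : List (List Int)) (uv : Int × Int) : List (List Int) :=
  if uv.1 = uv.2 then acc
  else acc ++ [if uv.1 < uv.2 then [uv.1, uv.2] else [uv.2, uv.1]]

-- second pass of B: keep a pair only when it differs from the last kept one
def pvStepD (out : List (List Int)) (p : List Int) : List (List Int) :=
  if out = [] ∨ out.getLast? ≠ some p then out ++ [p] else out

def normalize_edges_py_alt (edges : List (Int × Int)) : List (List Int) :=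
  (PySem.List.sorted (edges.foldl pvStepP []) (fun x => x) false).foldl pvStepD []

-- ===== PRECONDITION & SPEC =====
def Spec_normalize_edges_py (edges : List (Int × Int)) (out : List (List Int)) : Prop := out = normalize_edges_py_alt edges
instance (edges : List (Int × Int)) (out : List (List Int)) : Decidable (Spec_normalize_edges_py edges out) := by unfold Spec_normalize_edges_py; infer_instance

-- ===== CLAIM (what is proved, stated in full; the proofs are below) =====
def Claim_equal_normalize_edges_py : Prop := ∀ (edges : List (Int × Int)), Dom_normalize_edges_py edges → Spec_normalize_edges_py edges (normalize_edges_py edges)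

-- ===== LEMMAS AND PROOFS =====

-- the elaborated DecidableLT instance of the ports equals the LinearOrder one (so the order lemmas apply)
theorem pvDecEq : (fun a b => a.decidableLT b : DecidableLT (List Int)) = LinearOrder.toDecidableLT := by
  funext a b; exact Subsingleton.elim _ _

-- the canonical-pair stream both programs filter from `edges`
def pvCanon (edges : List (Int × Int)) : List (Int × Int) :=
  edges.flatMap (fun uv =>
    if uv.1 = uv.2 then []
    else if uv.1 < uv.2 then [(uv.1, uv.2)] else [(uv.2, uv.1)])

def pvToL (p : Int × Int) : List Int := [p.1, p.2]

theorem pvToL_injective : Function.Injective pvToL := by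
  intro a b h
  simp [pvToL] at h
  exact Prod.ext h.1 h.2

-- A's loop = building the set of canonical pairs, out mirroring it through pvToL
theorem pvFoldA (edges : List (Int × Int)) :
    ∀ seen : PySem.Set (Int × Int),
    edges.foldl pvStepA (seen, seen.map pvToL) =
      ((pvCanon edges).foldl PySem.Set.add seen,
       ((pvCanon edges).foldl PySem.Set.add seen).map pvToL) := by
  induction edges with
  | nil => intro seen; simp [pvCanon]
  | cons uv rest ih =>
    intro seen
    rcases uv with ⟨u, v⟩
    by_cases h1 : u = v
    · subst h1
      simpa [pvCanon, pvStepA, List.flatMap_cons] using ih seen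
    · by_cases h2 : u < v
      · have hle : u ≤ v := le_of_lt h2
        simp only [pvCanon, List.flatMap_cons, if_neg h1, if_pos h2,
          List.cons_append, List.nil_append, List.foldl_cons] at *
        by_cases hc : ((u, v) : Int × Int) ∈ seen
        · have hadd : PySem.Set.add seen (u, v) = seen := by
            simp [PySem.Set.add, PySem.Set.contains, hc]
          rw [show pvStepA (seen, seen.map pvToL) (u, v) = (seen, seen.map pvToL) by
            simp [pvStepA, PySem.Set.contains, hle, h1, hc], hadd]
          exact ih seen
        · have hadd : PySem.Set.add seen (u, v) = seen ++ [(u, v)] := by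
            simp [PySem.Set.add, PySem.Set.contains, hc]
          rw [show pvStepA (seen, seen.map pvToL) (u, v)
              = (seen ++ [(u, v)], (seen ++ [(u, v)]).map pvToL) by
            simp [pvStepA, PySem.Set.contains, hle, h1, hc, pvToL], hadd]
          exact ih (seen ++ [(u, v)])
      · have hgt : v < u := lt_of_le_of_ne (le_of_not_gt h2) (Ne.symm h1)
        have hnle : ¬ u ≤ v := not_le_of_gt hgt
        simp only [pvCanon, List.flatMap_cons, if_neg h1, if_neg h2,
          List.cons_append, List.nil_append, List.foldl_cons] at *
        by_cases hc : ((v, u) : Int × Int) ∈ seen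
        · have hadd : PySem.Set.add seen (v, u) = seen := by
            simp [PySem.Set.add, PySem.Set.contains, hc]
          rw [show pvStepA (seen, seen.map pvToL) (u, v) = (seen, seen.map pvToL) by
            simp [pvStepA, PySem.Set.contains, hnle, ne_of_lt hgt, hc], hadd]
          exact ih seen
        · have hadd : PySem.Set.add seen (v, u) = seen ++ [(v, u)] := by
            simp [PySem.Set.add, PySem.Set.contains, hc]
          rw [show pvStepA (seen, seen.map pvToL) (u, v)
              = (seen ++ [(v, u)], (seen ++ [(v, u)]).map pvToL) by
            simp [pvStepA, PySem.Set.contains, hnle, ne_of_lt hgt, hc, pvToL], hadd]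
          exact ih (seen ++ [(v, u)])

-- B's first pass = the canonical stream through pvToL
theorem pvFoldP (edges : List (Int × Int)) :
    ∀ acc : List (List Int),
    edges.foldl pvStepP acc = acc ++ (pvCanon edges).map pvToL := by
  induction edges with
  | nil => intro acc; simp [pvCanon]
  | cons uv rest ih =>
    intro acc
    rcases uv with ⟨u, v⟩
    by_cases h1 : u = v
    · simp [pvStepP, pvCanon, List.flatMap_cons, h1, ih]
    · by_cases h2 : u < v
      · simp [pvStepP, pvCanon, List.flatMap_cons, h1, h2, ih, pvToL]
      · simp [pvStepP, pvCanon, List.flatMap_cons, h1, h2, ih, pvToL]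

-- membership through B's adjacent-dedup pass
theorem pvMemD (S : List (List Int)) :
    ∀ acc x, x ∈ S.foldl pvStepD acc ↔ x ∈ acc ∨ x ∈ S := by
  induction S with
  | nil => intro acc x; simp
  | cons p rest ih =>
    intro acc x
    simp only [List.foldl_cons, pvStepD]
    by_cases h : acc = [] ∨ acc.getLast? ≠ some p
    · rw [if_pos h, ih]
      simp [List.mem_append, or_assoc]
    · have h' := not_or.mp h
      have hlastEq : acc.getLast? = some p := not_not.mp h'.2
      have hp : p ∈ acc := List.mem_of_getLast? hlastEq
      rw [if_neg h, ih]
      simp only [List.mem_cons]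
      constructor
      · tauto
      · rintro (ha | rfl | hr)
        · exact Or.inl ha
        · exact Or.inl hp
        · exact Or.inr hr

-- in a ≤-sorted list every member is ≤ the last element
theorem pvLeGetLast (l : List (List Int)) (h : l.Pairwise (· ≤ ·)) (a m : List Int)
    (ha : a ∈ l) (hm : l.getLast? = some m) : a ≤ m := by
  induction l with
  | nil => simp at ha
  | cons x xs ih =>
    cases xs with
    | nil =>
      simp at ha hm
      simp [ha, hm]
    | cons y ys =>
      rw [List.getLast?_cons_cons] at hm
      rcases List.mem_cons.mp ha with rfl | ha'
      · have hmem : m ∈ y :: ys := List.mem_of_getLast? hm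
        exact List.rel_of_pairwise_cons h hmem
      · exact ih h.tail ha' hm

-- strict sortedness of B's adjacent-dedup pass on a ≤-sorted input
theorem pvPairwiseD (S : List (List Int)) :
    ∀ acc : List (List Int), acc.Pairwise (· < ·) →
    (∀ p ∈ S, ∀ a ∈ acc, a ≤ p) → S.Pairwise (· ≤ ·) →
    (S.foldl pvStepD acc).Pairwise (· < ·) := by
  induction S with
  | nil => intro acc h _ _; simpa using h
  | cons p rest ih =>
    intro acc hacc hle hS
    simp only [List.foldl_cons, pvStepD]
    have hSrest : rest.Pairwise (· ≤ ·) := hS.tail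
    have hple : ∀ q ∈ rest, p ≤ q := fun q hq => List.rel_of_pairwise_cons hS hq
    by_cases h : acc = [] ∨ acc.getLast? ≠ some p
    · rw [if_pos h]
      apply ih
      · rw [List.pairwise_append]
        refine ⟨hacc, by simp, ?_⟩
        intro a ha b hb
        simp only [List.mem_singleton] at hb
        rw [hb]
        have hap : a ≤ p := hle p (by simp) a ha
        rcases lt_or_eq_of_le hap with hlt | heq
        · exact hlt
        · exfalso
          have hne : acc ≠ [] := by intro hn; simp [hn] at ha
          obtain ⟨l, hl⟩ := Option.ne_none_iff_exists'.mp
            (fun hn => hne (List.getLast?_eq_none_iff.mp hn))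
          have hlast : acc.getLast? ≠ some p := by
            rcases h with hnil | hlast
            · exact absurd hnil hne
            · exact hlast
          have hlmem : l ∈ acc := List.mem_of_getLast? hl
          have hllep : l ≤ p := hle p (by simp) l hlmem
          have hal : a ≤ l := pvLeGetLast acc (hacc.imp le_of_lt) a l ha hl
          have : l = p := le_antisymm hllep (heq ▸ hal)
          exact hlast (this ▸ hl)
      · intro q hq a ha
        rcases List.mem_append.mp ha with h1 | h1
        · exact hle q (by simp [hq]) a h1
        · simp only [List.mem_singleton] at h1; subst h1; exact hple q hq
      · exact hSrest
    · rw [if_neg h]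
      exact ih acc hacc (fun q hq a ha => hle q (by simp [hq]) a ha) hSrest

-- A's loop from the empty state
theorem pvFoldA0 (edges : List (Int × Int)) :
    edges.foldl pvStepA (PySem.Set.empty, []) =
      (PySem.Set.ofList (pvCanon edges),
       (PySem.Set.ofList (pvCanon edges)).map pvToL) := by
  have h := pvFoldA edges []
  simpa [PySem.Set.ofList_eq_foldl, PySem.Set.empty] using h

-- mem_sorted specialised to the LinearOrder instances the rewritten goal carries
theorem pvMemSortedLO (xs : List (List Int)) (x : List Int) :
    x ∈ @PySem.List.sorted (List Int) (List Int) List.instLinearOrder.toLT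
        LinearOrder.toDecidableLT xs (fun y => y) false ↔ x ∈ xs := by
  rw [← pvDecEq]
  exact PySem.List.mem_sorted xs (fun y => y) false x

-- ===== VERDICT (by name: the statement is the Claim_ definition above) =====
theorem normalize_edges_py_spec : Claim_equal_normalize_edges_py := by
  intro edges _
  unfold Spec_normalize_edges_py normalize_edges_py normalize_edges_py_alt
  rw [pvFoldA0, pvFoldP edges []]
  simp only [List.nil_append]
  rw [pvDecEq]
  apply PySem.List.sorted_eq_of_perm_of_pairwise_lt
  · -- the dedup pass is a permutation of A's nodup list
    apply (List.perm_ext_iff_of_nodup ?_ ?_).mpr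
    · intro x
      rw [pvMemD]
      simp only [List.not_mem_nil, false_or]
      rw [pvMemSortedLO]
      simp [List.mem_map, PySem.Set.mem_ofList]
    · exact (pvPairwiseD _ [] (by simp) (by simp)
        (PySem.List.sorted_pairwise (κ := List Int) _ (fun x => x))).imp ne_of_lt
    · exact (PySem.Set.nodup_ofList _).map pvToL_injective
  · exact pvPairwiseD _ [] (by simp) (by simp)
      (PySem.List.sorted_pairwise (κ := List Int) _ (fun x => x))
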